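-- pv_equiv track=rewrite | github.com/dellelce/trello-project | code/listplaces.py | check_body
-- ===== SOURCE A (Python) =====
-- def check_body(body):
--   '''check if body needs reformatting'''
--   _body = body.splitlines()
--   newbody = []
--   state = 0
--   changes = 0
--
--   for line in _body:
--
--    if state == 0:
--     if 'Unsubscribe from this Google Alert:' in line:
--      state = 1
--      changes += 1
--      continue
--
--     if 'Create another Google Alert:' in line:
--      state = 1
--      changes += 1
--      continue
--
--     if 'Sign in to manage your alerts:' in line:
--      state = 1
--      changes += 1
--      continue
--
--     # keep all other lines (google urls to be modified though...)
--     newbody.append(line)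
--
--    if state == 1:
--     # empty lines = change of state
--     if line == '':
--      state = 0
--
--     # all other lines are just!
--     changes += 1
--
--   return (changes, '\n'.join(newbody))
-- ===== SOURCE B (Python) =====
-- MARKERS = ('Unsubscribe from this Google Alert:',
--            'Create another Google Alert:',
--            'Sign in to manage your alerts:')
--
-- def check_body(body):
--     lines = body.splitlines()
--     n = len(lines)
--     i = 0
--     newbody = []
--     changes = 0
--     while i < n:
--         line = lines[i]
--         if any(m in line for m in MARKERS):
--             changes += 1
--             i += 1
--             while i < n and lines[i] != '':
--                 changes += 1
--                 i += 1
--             if i < n: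
--                 changes += 1
--                 i += 1
--         else:
--             newbody.append(line)
--             i += 1
--     return (changes, '\n'.join(newbody))
-- ===== Notes on version B (the rewrite author's own statement) =====
-- stated objective: alternative
-- what changed: Replaces A's explicit state-flag streaming machine (state 0/1 carried across one flat loop) with an index-driven loop that, on seeing a marker line, consumes the whole footer block with a nested inner while (counting each nonblank line and the terminating blank line), so no state variable survives between iterations.
import Mathlib
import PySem

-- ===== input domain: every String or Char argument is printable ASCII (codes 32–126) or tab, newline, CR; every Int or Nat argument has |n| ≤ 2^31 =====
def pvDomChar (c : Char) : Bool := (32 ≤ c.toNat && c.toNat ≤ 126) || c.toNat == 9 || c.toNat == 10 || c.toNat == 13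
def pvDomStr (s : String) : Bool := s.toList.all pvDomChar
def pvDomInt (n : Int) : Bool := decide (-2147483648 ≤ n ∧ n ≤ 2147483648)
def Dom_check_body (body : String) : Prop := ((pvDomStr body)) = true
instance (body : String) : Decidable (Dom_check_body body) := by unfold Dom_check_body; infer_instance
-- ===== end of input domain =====

-- B replaces A's state-flag streaming machine with a nested block-consuming loop
-- (marker found → skip-and-count the footer block and its terminating blank line);
-- objective: alternative decomposition, same O(n) cost.

-- ===== PORT A =====
-- state machine step over (state, changes, newbody), exactly A's branch order
def aStep (st : Int × Int × List String) (line : String) : Int × Int × List String :=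
  let state := st.1
  let changes := st.2.1
  let newbody := st.2.2
  if state == 0 then
    if PySem.Str.isIn "Unsubscribe from this Google Alert:" line then (1, changes + 1, newbody)
    else if PySem.Str.isIn "Create another Google Alert:" line then (1, changes + 1, newbody)
    else if PySem.Str.isIn "Sign in to manage your alerts:" line then (1, changes + 1, newbody)
    else (0, changes, newbody ++ [line])   -- state stays 0, the 'if state == 1' block is not entered
  else  -- state == 1
    if line == "" then (0, changes + 1, newbody) else (1, changes + 1, newbody)

def check_body (body : String) : Int × String :=
  let r := (PySem.Str.splitlines body).foldl aStep (0, 0, [])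
  (r.2.1, PySem.Str.join "\n" r.2.2)

-- ===== PORT B =====
def bMarker (line : String) : Bool :=
  PySem.Str.isIn "Unsubscribe from this Google Alert:" line ||
  PySem.Str.isIn "Create another Google Alert:" line ||
  PySem.Str.isIn "Sign in to manage your alerts:" line

-- inner while: count and consume nonblank lines, then count and consume the blank
def bSkip : List String → Int × List String
  | [] => (0, [])
  | l :: ls => if l == "" then (1, ls) else
      let r := bSkip ls
      (r.1 + 1, r.2)

theorem bSkip_len_le : ∀ ls : List String, (bSkip ls).2.length ≤ ls.length := by
  intro ls
  induction ls with
  | nil => simp [bSkip]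
  | cons l ls ih =>
    by_cases h : l = ""
    · simp [bSkip, h]
    · have hb : (l == "") = false := by simp [h]
      simp [bSkip, hb]
      exact Nat.le_succ_of_le ih

def bGo : List String → Int × List String
  | [] => (0, [])
  | l :: ls =>
    if bMarker l then
      let s := bSkip ls
      let r := bGo s.2
      (1 + s.1 + r.1, r.2)
    else
      let r := bGo ls
      (r.1, l :: r.2)
termination_by ls => ls.length
decreasing_by
  · exact Nat.lt_succ_of_le (bSkip_len_le ls)
  · exact Nat.lt_succ_self _

def check_body_alt (body : String) : Int × String :=
  let r := bGo (PySem.Str.splitlines body)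
  (r.1, PySem.Str.join "\n" r.2)

-- ===== PRECONDITION & SPEC =====
def Spec_check_body (body : String) (out : Int × String) : Prop := out = check_body_alt body
instance (body : String) (out : Int × String) : Decidable (Spec_check_body body out) := by unfold Spec_check_body; infer_instance

-- ===== CLAIM (what is proved, stated in full; the proofs are below) =====
def Claim_equal_check_body : Prop := ∀ (body : String), Dom_check_body body → Spec_check_body body (check_body body)

-- ===== LEMMAS AND PROOFS =====

-- A's fold in footer state 1 = B's bSkip, then resume in state 0
theorem foldl_state1 : ∀ (ls : List String) (c : Int) (nb : List String),
    (ls.foldl aStep (1, c, nb)).2 = ((bSkip ls).2.foldl aStep (0, c + (bSkip ls).1, nb)).2 := by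
  intro ls
  induction ls with
  | nil => intro c nb; simp [bSkip]
  | cons l ls ih =>
    intro c nb
    by_cases h : l = ""
    · simp [bSkip, h, aStep]
    · have hb : (l == "") = false := by simp [h]
      have hstep : aStep (1, c, nb) l = (1, c + 1, nb) := by
        simp [aStep, h]
      simp only [List.foldl_cons, hstep]
      rw [ih]
      simp [bSkip, hb]
      ring_nf

-- A's fold from state 0 computes B's bGo
theorem foldl_state0 : ∀ (ls : List String) (c : Int) (nb : List String),
    (ls.foldl aStep (0, c, nb)).2 = (c + (bGo ls).1, nb ++ (bGo ls).2) := by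
  intro ls
  induction ls using bGo.induct with
  | case1 => intro c nb; simp [bGo]
  | case2 l ls hm s ih =>
    intro c nb
    have hstep : aStep (0, c, nb) l = (1, c + 1, nb) := by
      simp only [aStep]
      split_ifs with h1 h2 h3 h4 <;> simp_all [bMarker]
    simp only [List.foldl_cons, hstep]
    rw [foldl_state1, ih]
    simp only [bGo, if_pos hm]
    have e : c + 1 + (bSkip ls).1 + (bGo (bSkip ls).2).1
        = c + (1 + (bSkip ls).1 + (bGo (bSkip ls).2).1) := by ring
    exact congrArg (fun z => (z, nb ++ (bGo (bSkip ls).2).2)) e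
  | case3 l ls hm ih =>
    intro c nb
    have hstep : aStep (0, c, nb) l = (0, c, nb ++ [l]) := by
      simp only [aStep]
      split_ifs with h1 h2 h3 h4 <;> simp_all [bMarker]
    simp only [List.foldl_cons, hstep]
    rw [ih]
    simp [bGo, hm]

-- ===== VERDICT (by name: the statement is the Claim_ definition above) =====
theorem check_body_spec : Claim_equal_check_body := by
  intro body _
  have h := foldl_state0 (PySem.Str.splitlines body) 0 []
  unfold Spec_check_body check_body check_body_alt
  simp [h]
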